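-- pv_equiv track=rewrite | github.com/bhaveshmangnani/online_coding | Hacker_Rank/Recursion_Davis'_Staircase.py | stepPerms
-- ===== SOURCE A (Python) =====
-- def stepPerms(n):
--     # Write your code here
--     if n==1 or n == 2:
--         return n
--     if n==3:
--         return 4
--     n_1 = 1
--     n_2 = 2
--     n_3 = 4
--     newn = 0
--     for i in range(3,n):
--         newn = n_1 + n_2 + n_3
--         n_1 = n_2
--         n_2 = n_3
--         n_3 = newn
--     return n_3
-- ===== SOURCE B (Python) =====
-- def stepPerms(n):
--     # Count compositions of n into parts 1,2,3 via 3x3 matrix exponentiation: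
--     # (f(n), f(n-1), f(n-2)) = M^n (1, 0, 0) with M = [[1,1,1],[1,0,0],[0,1,0]],
--     # so the answer is the top-left entry of M^n (log n squarings instead of a length-n loop).
--     if n < 0:
--         return 0
--     def mul(x, y):
--         (a, b, c, d, e, f, g, h, i) = x
--         (p, q, r, s, t, u, v, w, z) = y
--         return (a*p + b*s + c*v, a*q + b*t + c*w, a*r + b*u + c*z,
--                 d*p + e*s + f*v, d*q + e*t + f*w, d*r + e*u + f*z,
--                 g*p + h*s + i*v, g*q + h*t + i*w, g*r + h*u + i*z)
--     result = (1, 0, 0, 0, 1, 0, 0, 0, 1)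
--     base = (1, 1, 1, 1, 0, 0, 0, 1, 0)
--     e = n
--     while e > 0:
--         if e & 1:
--             result = mul(result, base)
--         base = mul(base, base)
--         e >>= 1
--     return result[0]
-- ===== Notes on version B (the rewrite author's own statement) =====
-- stated objective: alternative
-- what changed: Replaced the linear tribonacci accumulator loop by binary exponentiation by squaring of the 3x3 companion matrix [[1,1,1],[1,0,0],[0,1,0]], reading the answer off the top-left entry (O(log n) matrix multiplications instead of O(n) additions; on bignum-sized results the large-integer arithmetic dominates, so no unqualified speed claim is made).
-- intended difference: For nonpositive n, A returns its untouched initial accumulator value four, which counts nothing; B returns the intended count: one for the empty staircase n = 0 and zero for negative n. — e.g. on stepPerms(0): A returns 4, B returns 1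
import Mathlib
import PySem

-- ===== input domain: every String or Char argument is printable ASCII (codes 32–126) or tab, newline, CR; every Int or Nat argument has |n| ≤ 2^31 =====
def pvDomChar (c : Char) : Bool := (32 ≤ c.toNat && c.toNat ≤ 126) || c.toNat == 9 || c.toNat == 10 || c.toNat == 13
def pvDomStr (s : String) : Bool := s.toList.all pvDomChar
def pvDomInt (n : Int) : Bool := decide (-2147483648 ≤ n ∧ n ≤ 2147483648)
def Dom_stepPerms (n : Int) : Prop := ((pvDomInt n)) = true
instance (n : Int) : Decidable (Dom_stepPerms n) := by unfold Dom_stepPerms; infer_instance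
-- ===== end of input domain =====

-- B replaces A's linear tribonacci loop by binary exponentiation of the 3x3 companion matrix (objective: alternative algorithm).


-- ===== PORT A =====
def stepPerms (n : Int) : Int :=
  if n = 1 ∨ n = 2 then n
  else if n = 3 then 4
  else
    -- n_1 = 1; n_2 = 2; n_3 = 4; newn = 0; for i in range(3, n): …
    let st := (PySem.List.pyRange 3 n 1).foldl
      (fun (s : Int × Int × Int × Int) _ =>
        let newn := s.1 + s.2.1 + s.2.2.1
        (s.2.1, s.2.2.1, newn, newn)) (1, 2, 4, 0)
    st.2.2.1

-- ===== PORT B =====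
-- a 3x3 integer matrix as a 9-tuple in row-major order, as in Source B
abbrev pvMat9 : Type := Int × Int × Int × Int × Int × Int × Int × Int × Int

def pvMul (x y : pvMat9) : pvMat9 :=
  match x, y with
  | (a, b, c, d, e, f, g, h, i), (p, q, r, s, t, u, v, w, z) =>
    (a*p + b*s + c*v, a*q + b*t + c*w, a*r + b*u + c*z,
     d*p + e*s + f*v, d*q + e*t + f*w, d*r + e*u + f*z,
     g*p + h*s + i*v, g*q + h*t + i*w, g*r + h*u + i*z)

def pvI : pvMat9 := (1, 0, 0, 0, 1, 0, 0, 0, 1)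
def pvM : pvMat9 := (1, 1, 1, 1, 0, 0, 0, 1, 0)

-- the `while e > 0` squaring loop of Source B
def pvPowLoop (e : Nat) (result base : pvMat9) : pvMat9 :=
  if h : e = 0 then result
  else pvPowLoop (e / 2) (if e % 2 = 1 then pvMul result base else result) (pvMul base base)
termination_by e
decreasing_by exact Nat.div_lt_self (Nat.pos_of_ne_zero h) (by norm_num)

def stepPerms_alt (n : Int) : Int :=
  if n < 0 then 0
  else (pvPowLoop n.toNat pvI pvM).1

-- ===== PRECONDITION & SPEC =====
-- For nonpositive n, A returns its untouched initial accumulator value four, which counts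
-- nothing; B returns the intended count: one for the empty staircase n = 0 and zero for negative n.
def D_stepPerms (n : Int) : Prop := n ≤ 0
instance (n : Int) : Decidable (D_stepPerms n) := by unfold D_stepPerms; infer_instance

def Spec_stepPerms (n : Int) (out : Int) : Prop := ¬ D_stepPerms n → out = stepPerms_alt n
instance (n : Int) (out : Int) : Decidable (Spec_stepPerms n out) := by unfold Spec_stepPerms; infer_instance

def pvDiffWitness_stepPerms : Int := 0
def pvDiffWitnessOut_stepPerms : Int × Int := (4, 1)

-- ===== CLAIM (what is proved, stated in full; the proofs are below) =====
def Claim_unchanged_stepPerms : Prop := ∀ (n : Int), Dom_stepPerms n → Spec_stepPerms n (stepPerms n)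
def Claim_changed_stepPerms : Prop := Dom_stepPerms (pvDiffWitness_stepPerms) ∧ D_stepPerms (pvDiffWitness_stepPerms) ∧ stepPerms (pvDiffWitness_stepPerms) = pvDiffWitnessOut_stepPerms.1 ∧ stepPerms_alt (pvDiffWitness_stepPerms) = pvDiffWitnessOut_stepPerms.2 ∧ pvDiffWitnessOut_stepPerms.1 ≠ pvDiffWitnessOut_stepPerms.2
def Claim_exact_stepPerms : Prop := ∀ (n : Int), Dom_stepPerms n → D_stepPerms n → stepPerms n ≠ stepPerms_alt n

-- ===== LEMMAS AND PROOFS =====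

-- the shifted tribonacci sequence: pvS (n+2) = number of 1/2/3-compositions of n
def pvS : Nat → Int
  | 0 => 0
  | 1 => 0
  | 2 => 1
  | (k+3) => pvS (k+2) + pvS (k+1) + pvS k

-- mathematical power, multiplying on the right
def pvPow (b : pvMat9) : Nat → pvMat9
  | 0 => pvI
  | (k+1) => pvMul (pvPow b k) b

theorem pvS_rec (k : Nat) : pvS (k + 3) = pvS (k + 2) + pvS (k + 1) + pvS k := by
  rw [pvS]

theorem pvS_congr {a b : Nat} (h : a = b) : pvS a = pvS b := by rw [h]

theorem pvMul_assoc (x y z : pvMat9) : pvMul (pvMul x y) z = pvMul x (pvMul y z) := by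
  obtain ⟨a, b, c, d, e, f, g, h, i⟩ := x
  obtain ⟨p, q, r, s, t, u, v, w, z'⟩ := y
  obtain ⟨a', b', c', d', e', f', g', h', i'⟩ := z
  simp only [pvMul, Prod.mk.injEq]
  refine ⟨?_, ?_, ?_, ?_, ?_, ?_, ?_, ?_, ?_⟩ <;> ring

theorem pvMul_one (x : pvMat9) : pvMul x pvI = x := by
  obtain ⟨a, b, c, d, e, f, g, h, i⟩ := x
  simp only [pvMul, pvI, Prod.mk.injEq]
  refine ⟨?_, ?_, ?_, ?_, ?_, ?_, ?_, ?_, ?_⟩ <;> ring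

theorem pvOne_mul (x : pvMat9) : pvMul pvI x = x := by
  obtain ⟨a, b, c, d, e, f, g, h, i⟩ := x
  simp only [pvMul, pvI, Prod.mk.injEq]
  refine ⟨?_, ?_, ?_, ?_, ?_, ?_, ?_, ?_, ?_⟩ <;> ring

theorem pvPow_one (b : pvMat9) : pvPow b 1 = b := by
  show pvMul (pvPow b 0) b = b
  show pvMul pvI b = b
  exact pvOne_mul b

theorem pvPow_add (b : pvMat9) (m k : Nat) :
    pvPow b (m + k) = pvMul (pvPow b m) (pvPow b k) := by
  induction k with
  | zero => simp [pvPow, pvMul_one]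
  | succ k ih =>
      show pvPow (b) (m + k + 1) = _
      rw [pvPow, ih, pvPow, pvMul_assoc]

theorem pvPow_sq (b : pvMat9) (k : Nat) : pvPow (pvMul b b) k = pvPow b (2 * k) := by
  induction k with
  | zero => rfl
  | succ k ih =>
      have h2 : pvPow b 2 = pvMul b b := by
        show pvMul (pvPow b 1) b = _
        rw [pvPow_one]
      rw [pvPow, ih, ← h2, ← pvPow_add, show 2 * (k + 1) = 2 * k + 2 by ring]

theorem pvPowLoop_eq (e : Nat) : ∀ r b : pvMat9, pvPowLoop e r b = pvMul r (pvPow b e) := by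
  induction e using Nat.strong_induction_on with
  | _ e ih =>
    intro r b
    by_cases h : e = 0
    · subst h; rw [pvPowLoop]; simp [pvPow, pvMul_one]
    · rw [pvPowLoop, dif_neg h,
        ih (e / 2) (Nat.div_lt_self (Nat.pos_of_ne_zero h) one_lt_two), pvPow_sq]
      by_cases hodd : e % 2 = 1
      · rw [if_pos hodd, pvMul_assoc]
        congr 1
        conv_rhs => rw [show e = 1 + 2 * (e / 2) by omega]
        rw [pvPow_add, pvPow_one]
      · rw [if_neg hodd, show 2 * (e / 2) = e by omega]

theorem pvPow_M (k : Nat) :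
    pvPow pvM (k + 2) =
      (pvS (k+4), pvS (k+3) + pvS (k+2), pvS (k+3),
       pvS (k+3), pvS (k+2) + pvS (k+1), pvS (k+2),
       pvS (k+2), pvS (k+1) + pvS k, pvS (k+1)) := by
  induction k with
  | zero => rfl
  | succ k ih =>
      show pvMul (pvPow pvM (k + 2)) pvM = _
      rw [ih]
      simp only [pvMul, pvM, Prod.mk.injEq]
      have ra : pvS (k+4) = pvS (k+3) + pvS (k+2) + pvS (k+1) := by
        have h := pvS_rec (k+1)
        simp only [show k+1+3 = k+4 by omega, show k+1+2 = k+3 by omega,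
                   show k+1+1 = k+2 by omega] at h
        exact h
      have rb : pvS (k+5) = pvS (k+4) + pvS (k+3) + pvS (k+2) := by
        have h := pvS_rec (k+2)
        simp only [show k+2+3 = k+5 by omega, show k+2+2 = k+4 by omega,
                   show k+2+1 = k+3 by omega] at h
        exact h
      have rc : pvS (k+3) = pvS (k+2) + pvS (k+1) + pvS k := pvS_rec k
      refine ⟨?_, ?_, ?_, ?_, ?_, ?_, ?_, ?_, ?_⟩ <;>
        · simp only [show k+1+4 = k+5 by omega, show k+1+3 = k+4 by omega,
                     show k+1+2 = k+3 by omega, show k+1+1 = k+2 by omega]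
          linarith [ra, rb, rc]

theorem pvPow_M_head (k : Nat) : (pvPow pvM (k + 1)).1 = pvS (k + 3) := by
  cases k with
  | zero => rw [pvPow_one]; rfl
  | succ k => rw [pvPow_M]

-- A's loop as a pure iteration
def pvStep (s : Int × Int × Int × Int) : Int × Int × Int × Int :=
  let newn := s.1 + s.2.1 + s.2.2.1
  (s.2.1, s.2.2.1, newn, newn)

def pvIter : Nat → (Int × Int × Int × Int) → (Int × Int × Int × Int)
  | 0, s => s
  | (k+1), s => pvStep (pvIter k s)

theorem pvIter_succ' (k : Nat) (s : Int × Int × Int × Int) :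
    pvIter (k + 1) s = pvIter k (pvStep s) := by
  induction k with
  | zero => rfl
  | succ k ih => show pvStep (pvIter (k+1) s) = _; rw [ih]; rfl

theorem pvFoldl_iter (l : List Int) : ∀ s,
    l.foldl (fun (s : Int × Int × Int × Int) _ =>
      let newn := s.1 + s.2.1 + s.2.2.1
      (s.2.1, s.2.2.1, newn, newn)) s = pvIter l.length s := by
  induction l with
  | nil => intro s; rfl
  | cons a l ih =>
      intro s
      show l.foldl _ (pvStep s) = pvIter (l.length + 1) s
      rw [ih, pvIter_succ']

theorem pvIter_val (k : Nat) :
    pvIter (k + 1) (1, 2, 4, 0) = (pvS (k+4), pvS (k+5), pvS (k+6), pvS (k+6)) := by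
  induction k with
  | zero => rfl
  | succ k ih =>
      show pvStep (pvIter (k + 1) (1, 2, 4, 0)) = _
      rw [ih]
      simp only [pvStep, Prod.mk.injEq]
      have rd : pvS (k+7) = pvS (k+6) + pvS (k+5) + pvS (k+4) := by
        have h := pvS_rec (k+4)
        simp only [show k+4+3 = k+7 by omega, show k+4+2 = k+6 by omega,
                   show k+4+1 = k+5 by omega] at h
        exact h
      refine ⟨?_, ?_, ?_, ?_⟩ <;>
        · simp only [show k+1+4 = k+5 by omega, show k+1+5 = k+6 by omega,
                     show k+1+6 = k+7 by omega]
          try linarith [rd]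

theorem pvAlt_val (n : Int) (h1 : 1 ≤ n) : stepPerms_alt n = pvS (n.toNat + 2) := by
  rw [stepPerms_alt, if_neg (by omega), pvPowLoop_eq, pvOne_mul]
  obtain ⟨k, hk⟩ : ∃ k : Nat, n.toNat = k + 1 := ⟨n.toNat - 1, by omega⟩
  rw [hk, pvPow_M_head]

theorem pvA_val_big (n : Int) (h4 : 4 ≤ n) : stepPerms n = pvS (n.toNat + 2) := by
  rw [stepPerms, if_neg (by omega), if_neg (by omega)]
  simp only []
  rw [pvFoldl_iter, PySem.List.length_pyRange_one]
  obtain ⟨k, hk⟩ : ∃ k : Nat, (n - 3).toNat = k + 1 := ⟨(n - 3).toNat - 1, by omega⟩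
  rw [hk, pvIter_val]
  exact pvS_congr (by omega)

theorem pvA_small : stepPerms 0 = 4 := by
  rw [stepPerms, if_neg (by omega), if_neg (by omega)]
  rw [PySem.List.pyRange_one_eq_nil (by omega)]
  rfl

theorem pvAlt_zero : stepPerms_alt 0 = 1 := by
  have := pvPowLoop_eq 0 pvI pvM
  rw [stepPerms_alt, if_neg (by omega)]
  show (pvPowLoop 0 pvI pvM).1 = 1
  rw [this]
  rfl

-- ===== VERDICT (by name: the statement is the Claim_ definition above) =====
theorem stepPerms_spec : Claim_unchanged_stepPerms := by
  intro n _
  intro hD'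
  have h1 : 1 ≤ n := by
    unfold D_stepPerms at hD'; omega
  show stepPerms n = stepPerms_alt n
  rw [pvAlt_val n h1]
  rcases (by omega : n = 1 ∨ n = 2 ∨ n = 3 ∨ 4 ≤ n) with h | h | h | h
  · subst h
    rw [stepPerms, if_pos (Or.inl rfl)]
    decide
  · subst h
    rw [stepPerms, if_pos (Or.inr rfl)]
    decide
  · subst h
    rw [stepPerms, if_neg (by omega), if_pos rfl]
    decide
  · exact pvA_val_big n h

theorem stepPerms_changed : Claim_changed_stepPerms := by
  unfold Claim_changed_stepPerms
  refine ⟨by decide, by decide, pvA_small, pvAlt_zero, by decide⟩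

theorem stepPerms_tight : Claim_exact_stepPerms := by
  intro n _ hD
  unfold D_stepPerms at hD
  have hA : stepPerms n = 4 := by
    rw [stepPerms, if_neg (by omega), if_neg (by omega)]
    rw [PySem.List.pyRange_one_eq_nil (by omega)]
    rfl
  have hB : stepPerms_alt n = 0 ∨ stepPerms_alt n = 1 := by
    rcases lt_or_ge n 0 with h | h
    · left; rw [stepPerms_alt, if_pos h]
    · right
      have h0 : n = 0 := by omega
      subst h0
      exact pvAlt_zero
  rw [hA]
  rcases hB with h | h <;> rw [h] <;> norm_num
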